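-- pv_equiv track=rewrite | github.com/HannesDeittert/hpc-end | steve_recommender/evaluation/info_collectors.py | _contact_mode_from_records
-- ===== SOURCE A (Python) =====
-- from typing import Any, Dict, List, Optional, Tuple
--
-- def _contact_mode_from_records(contact_records: List[Dict[str, Any]]) -> str:
--     kinds = {
--         str(rec.get("contact_kind", "")).strip().lower()
--         for rec in contact_records
--         if str(rec.get("contact_kind", "")).strip().lower() in {"line", "point"}
--     }
--     if not kinds:
--         return "none"
--     if len(kinds) == 1:
--         return next(iter(kinds))
--     return "mixed"
-- ===== SOURCE B (Python) =====
-- def _contact_mode_from_records(contact_records):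
--     def kind(rec):
--         k = str(rec.get("contact_kind", "")).strip().lower()
--         return k if k in ("line", "point") else None
--
--     for i, rec in enumerate(contact_records):
--         first = kind(rec)
--         if first is not None:
--             other = "point" if first == "line" else "line"
--             if any(kind(r) == other for r in contact_records[i + 1:]):
--                 return "mixed"
--             return first
--     return "none"
-- ===== Notes on version B (the rewrite author's own statement) =====
-- stated objective: alternative
-- what changed: Instead of accumulating all normalised kinds in a set and dispatching on its size, B searches for the FIRST record with a relevant kind and then short-circuit-scans only the remaining suffix for the opposite kind: it returns 'mixed' / that first kind / 'none' immediately, building no collection and exiting early.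
import Mathlib
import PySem

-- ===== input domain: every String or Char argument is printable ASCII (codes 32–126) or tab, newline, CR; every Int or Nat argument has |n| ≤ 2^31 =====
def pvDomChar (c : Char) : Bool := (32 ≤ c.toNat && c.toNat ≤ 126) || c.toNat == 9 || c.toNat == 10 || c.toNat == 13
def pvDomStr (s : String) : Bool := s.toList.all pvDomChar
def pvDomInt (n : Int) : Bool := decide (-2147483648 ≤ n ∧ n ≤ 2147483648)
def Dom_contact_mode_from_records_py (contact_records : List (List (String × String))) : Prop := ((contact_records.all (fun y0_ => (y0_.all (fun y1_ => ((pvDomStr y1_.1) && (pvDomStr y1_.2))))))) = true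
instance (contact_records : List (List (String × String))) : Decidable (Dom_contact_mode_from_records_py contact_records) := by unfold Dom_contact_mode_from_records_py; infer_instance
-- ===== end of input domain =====

-- B replaces A's set-of-kinds plus len/next(iter) dispatch by a staged search: find the
-- first relevant record, then scan only the remaining suffix for the opposite kind;
-- objective: alternative (early-exit, builds no collection).

-- ===== PORT A =====
-- normalised contact kind of a record: str(rec.get("contact_kind","")).strip().lower()
def pvNormKind (rec : List (String × String)) : String :=
  PySem.Str.lower (PySem.Str.strip ((PySem.Dict.mk rec).getD "contact_kind" ""))

-- set comprehension, then dispatch on emptiness / size; next(iter(kinds)) is taken on a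
-- singleton set only, where iteration order is irrelevant (headD "" is exact there)
def contact_mode_from_records_py (contact_records : List (List (String × String))) : String :=
  let kinds : PySem.Set String :=
    PySem.Set.ofList ((contact_records.filter
      (fun rec => pvNormKind rec == "line" || pvNormKind rec == "point")).map pvNormKind)
  if kinds = [] then "none"
  else if PySem.Set.len kinds = 1 then kinds.headD ""
  else "mixed"

-- ===== PORT B =====
-- B's helper kind(rec): the normalised kind if relevant, else None
def pvKindB (rec : List (String × String)) : Option String :=
  let k := PySem.Str.lower (PySem.Str.strip ((PySem.Dict.mk rec).getD "contact_kind" ""))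
  if k = "line" ∨ k = "point" then some k else none

-- B's loop: walk to the first record with a relevant kind; then any(...) over the suffix
def pvGoB : List (List (String × String)) → String
  | [] => "none"
  | r :: rest =>
    match pvKindB r with
    | none => pvGoB rest
    | some first =>
      let other := if first = "line" then "point" else "line"
      if rest.any (fun x => pvKindB x == some other) then "mixed" else first

def contact_mode_from_records_py_alt (contact_records : List (List (String × String))) : String :=
  pvGoB contact_records

-- ===== PRECONDITION & SPEC =====
def Spec_contact_mode_from_records_py (contact_records : List (List (String × String))) (out : String) : Prop := out = contact_mode_from_records_py_alt contact_records
instance (contact_records : List (List (String × String))) (out : String) : Decidable (Spec_contact_mode_from_records_py contact_records out) := by unfold Spec_contact_mode_from_records_py; infer_instance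

-- ===== CLAIM (what is proved, stated in full; the proofs are below) =====
def Claim_equal_contact_mode_from_records_py : Prop := ∀ (contact_records : List (List (String × String))), Dom_contact_mode_from_records_py contact_records → Spec_contact_mode_from_records_py contact_records (contact_mode_from_records_py contact_records)

-- ===== LEMMAS AND PROOFS =====

-- the common abstraction both sides are reduced to: the mode as a function of
-- "some record is 'line'" and "some record is 'point'"
def pvFlagForm (a b : Bool) : String :=
  if a && b then "mixed" else if a then "line" else if b then "point" else "none"

theorem pvKindB_eq (rec : List (String × String)) :
    pvKindB rec = if pvNormKind rec = "line" ∨ pvNormKind rec = "point"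
                  then some (pvNormKind rec) else none := rfl

theorem pvGoB_cons (r : List (String × String)) (rest : List (List (String × String))) :
    pvGoB (r :: rest) =
      match pvKindB r with
      | none => pvGoB rest
      | some first =>
        let other := if first = "line" then "point" else "line"
        if rest.any (fun x => pvKindB x == some other) then "mixed" else first := by
  rw [pvGoB.eq_def]

theorem pvKindB_beq (x : List (String × String)) (k : String)
    (hk : k = "line" ∨ k = "point") :
    (pvKindB x == some k) = (pvNormKind x == k) := by
  rw [pvKindB_eq]
  by_cases h : pvNormKind x = "line" ∨ pvNormKind x = "point"
  · simp [h]
  · push_neg at h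
    have : (pvNormKind x == k) = false := by
      rcases hk with rfl | rfl <;> simp [h.1, h.2]
    simp [h, this]

theorem pv_any_kindB (rest : List (List (String × String))) (k : String)
    (hk : k = "line" ∨ k = "point") :
    (rest.any (fun x => pvKindB x == some k))
      = rest.any (fun x => pvNormKind x == k) := by
  induction rest with
  | nil => simp only [List.any_nil]
  | cons x xs ih => simp only [List.any_cons, ih, pvKindB_beq x k hk]

-- B computes pvFlagForm of the two existential flags
theorem pvGoB_flags (l : List (List (String × String))) :
    pvGoB l = pvFlagForm (l.any (fun r => pvNormKind r == "line"))
                         (l.any (fun r => pvNormKind r == "point")) := by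
  induction l with
  | nil => rfl
  | cons r rest ih =>
    rw [pvGoB_cons]
    simp only [List.any_cons]
    by_cases h1 : pvNormKind r = "line"
    · have hk : pvKindB r = some "line" := by rw [pvKindB_eq]; simp [h1]
      have hp : (pvNormKind r == "point") = false := by simp [h1]
      rw [hk]
      simp only []
      simp only [if_true]
      rw [pv_any_kindB rest "point" (Or.inr rfl), hp, h1]
      cases hx : rest.any (fun x => pvNormKind x == "point") <;>
        simp [pvFlagForm, hx]
    · by_cases h2 : pvNormKind r = "point"
      · have hk : pvKindB r = some "point" := by rw [pvKindB_eq]; simp [h2]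
        have hl : (pvNormKind r == "line") = false := by simp [h2, h1]
        rw [hk]
        simp only []
        rw [if_neg (by decide : ¬ ("point" : String) = "line")]
        rw [pv_any_kindB rest "line" (Or.inl rfl), hl, h2]
        cases hx : rest.any (fun x => pvNormKind x == "line") <;>
          simp [pvFlagForm, hx]
      · have hk : pvKindB r = none := by rw [pvKindB_eq]; simp [h1, h2]
        have hl : (pvNormKind r == "line") = false := by simp [h1]
        have hp : (pvNormKind r == "point") = false := by simp [h2]
        rw [hk]
        simp only [hl, hp, Bool.false_or]
        exact ih

-- every element of the comprehension's list is "line" or "point"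
theorem pv_kindList_all (l : List (List (String × String))) :
    ∀ k ∈ (l.filter
      (fun rec => pvNormKind rec == "line" || pvNormKind rec == "point")).map pvNormKind,
      k = "line" ∨ k = "point" := by
  intro k hk
  simp only [List.mem_map, List.mem_filter, Bool.or_eq_true, beq_iff_eq] at hk
  obtain ⟨r, ⟨_, h⟩, he⟩ := hk
  rcases h with h | h
  · exact Or.inl (he ▸ h)
  · exact Or.inr (he ▸ h)

-- the existential flag equals membership in A's set of kinds
theorem pv_any_eq (l : List (List (String × String))) (k : String)
    (hk : k = "line" ∨ k = "point") :
    (l.any fun r => pvNormKind r == k)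
    = decide (k ∈ PySem.Set.ofList ((l.filter
        (fun rec => pvNormKind rec == "line" || pvNormKind rec == "point")).map pvNormKind)) := by
  have hmem : (k ∈ (l.filter
      (fun rec => pvNormKind rec == "line" || pvNormKind rec == "point")).map pvNormKind)
      ↔ (l.any fun r => pvNormKind r == k) = true := by
    simp only [List.mem_map, List.mem_filter, List.any_eq_true, beq_iff_eq, Bool.or_eq_true]
    constructor
    · rintro ⟨r, ⟨hr, _⟩, he⟩; exact ⟨r, hr, he⟩
    · rintro ⟨r, hr, he⟩
      refine ⟨r, ⟨hr, ?_⟩, he⟩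
      rcases hk with h | h <;> simp [he, h]
  by_cases hm : k ∈ PySem.Set.ofList ((l.filter
      (fun rec => pvNormKind rec == "line" || pvNormKind rec == "point")).map pvNormKind)
  · rw [decide_eq_true hm]
    exact hmem.mp ((PySem.Set.mem_ofList _ _).mp hm)
  · rw [decide_eq_false hm]
    exact Bool.eq_false_iff.mpr
      (fun hc => hm ((PySem.Set.mem_ofList _ _).mpr (hmem.mpr hc)))

-- folding Set.add over the two-element alphabet keeps the set one of five concrete lists
theorem pv_fold_shape (xs : List String) (h : ∀ k ∈ xs, k = "line" ∨ k = "point") :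
    ∀ s : PySem.Set String,
      (s = [] ∨ s = ["line"] ∨ s = ["point"] ∨ s = ["line", "point"] ∨ s = ["point", "line"]) →
      (xs.foldl PySem.Set.add s = [] ∨ xs.foldl PySem.Set.add s = ["line"] ∨
       xs.foldl PySem.Set.add s = ["point"] ∨ xs.foldl PySem.Set.add s = ["line", "point"] ∨
       xs.foldl PySem.Set.add s = ["point", "line"]) := by
  induction xs with
  | nil => intro s hs; simpa using hs
  | cons x xs ih =>
    intro s hs
    have hx := h x (List.mem_cons_self ..)
    have htail : ∀ k ∈ xs, k = "line" ∨ k = "point" :=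
      fun k hk => h k (List.mem_cons_of_mem _ hk)
    rw [List.foldl_cons]
    refine ih htail (PySem.Set.add s x) ?_
    rcases hs with h0 | h0 | h0 | h0 | h0 <;> rcases hx with h1 | h1 <;>
      subst h0 <;> subst h1 <;> simp [PySem.Set.add, PySem.Set.contains]

-- set(xs) for xs over the two-element alphabet is one of five concrete lists
theorem pv_ofList_shape (xs : List String)
    (h : ∀ k ∈ xs, k = "line" ∨ k = "point") :
    PySem.Set.ofList xs = [] ∨ PySem.Set.ofList xs = ["line"] ∨
    PySem.Set.ofList xs = ["point"] ∨ PySem.Set.ofList xs = ["line", "point"] ∨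
    PySem.Set.ofList xs = ["point", "line"] := by
  rw [PySem.Set.ofList_eq_foldl]
  exact pv_fold_shape xs h [] (Or.inl rfl)

-- A computes pvFlagForm of the same two flags
theorem pvA_flags (l : List (List (String × String))) :
    contact_mode_from_records_py l
    = pvFlagForm (l.any (fun r => pvNormKind r == "line"))
                 (l.any (fun r => pvNormKind r == "point")) := by
  unfold contact_mode_from_records_py
  rw [pv_any_eq l "line" (Or.inl rfl), pv_any_eq l "point" (Or.inr rfl)]
  rcases pv_ofList_shape _ (pv_kindList_all l) with h | h | h | h | h <;>
    rw [h] <;> simp [PySem.Set.len, pvFlagForm]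

theorem contact_mode_main (l : List (List (String × String))) :
    contact_mode_from_records_py l = contact_mode_from_records_py_alt l := by
  rw [pvA_flags, contact_mode_from_records_py_alt, pvGoB_flags]

-- ===== VERDICT (by name: the statement is the Claim_ definition above) =====
theorem contact_mode_from_records_py_spec : Claim_equal_contact_mode_from_records_py := by
  intro l _
  exact contact_mode_main l
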